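-- pv_equiv track=rewrite | github.com/GDcraft07/python_unecon | contests/contest_2.py | number_9
-- ===== SOURCE A (Python) =====
-- def number_9(line):
--     line = line.strip()
--
--     answer = 0
--
--     for i in range(len(line)):
--         count_173 = 0
--         count_y = 0
--
--         for j in range(i, len(line)):
--             if line[j] == "Y":
--                 count_y += 1
--
--             if j >= i + 2 and line[j - 2:j + 1] == "173":
--                 count_173 += 1
--
--             if count_y > 5:
--                 break
--
--             if count_y == 5 and count_173 >= 2 and answer < j - i + 1:
--                 answer = j - i + 1
--
--     return answer
-- ===== SOURCE B (Python) =====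
-- def number_9(line):
--     line = line.strip()
--     n = len(line)
--
--     # positions of the Y's, left to right
--     ys = [k for k in range(n) if line[k] == "Y"]
--
--     # P[k] = number of occurrences of "173" ending strictly before index k
--     P = [0]
--     for k in range(n):
--         P.append(P[-1] + (1 if k >= 2 and line[k - 2:k + 1] == "173" else 0))
--
--     answer = 0
--     cnt = 0  # Y's strictly before i
--     for i in range(n):
--         if cnt + 4 < len(ys):
--             # widest window starting at i with exactly 5 Y's ends just before the 6th Y
--             jmax = ys[cnt + 5] - 1 if cnt + 5 < len(ys) else n - 1
--             # "173"s fully inside [i, jmax] end at an index in [i+2, jmax]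
--             if P[jmax + 1] - P[i + 2] >= 2 and jmax - i + 1 > answer:
--                 answer = jmax - i + 1
--         if line[i] == "Y":
--             cnt += 1
--     return answer
-- ===== Notes on version B (the rewrite author's own statement) =====
-- stated objective: faster
-- what changed: Replaces the quadratic scan of all start positions with an O(n) pass: the list of Y-positions and a prefix count of '173' occurrences determine, for each start i, the unique widest window with exactly five Y's (ending just before the sixth Y) and whether it contains two '173's, in O(1).
import Mathlib
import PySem

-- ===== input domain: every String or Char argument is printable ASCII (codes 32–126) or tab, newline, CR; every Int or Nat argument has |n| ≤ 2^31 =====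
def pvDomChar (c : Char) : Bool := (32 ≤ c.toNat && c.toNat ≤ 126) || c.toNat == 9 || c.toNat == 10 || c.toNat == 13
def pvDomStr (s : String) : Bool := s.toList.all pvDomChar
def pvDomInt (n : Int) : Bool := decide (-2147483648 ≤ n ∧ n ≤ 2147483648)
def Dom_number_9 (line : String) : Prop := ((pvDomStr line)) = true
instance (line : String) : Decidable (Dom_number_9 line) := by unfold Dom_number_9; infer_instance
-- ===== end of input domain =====

-- Faster exact re-implementation: B finds, for each start i, the widest window with exactly
-- five Y's via the Y-position list and checks its "173" content with a prefix-count table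
-- (O(n)), instead of A's inner scan per start (O(n^2)).


-- ===== PORT A =====
-- inner loop 'for j in range(i, len(line)): …' with its early break, state (count_173, count_y, answer)
def goA (s : List Char) (i : Int) : List Int → Int → Int → Int → Int
  | [], _, _, ans => ans
  | j :: js, c173, cy, ans =>
    let cy' := if PySem.List.pyGet? s j = some 'Y' then cy + 1 else cy
    let c' := if i + 2 ≤ j ∧ PySem.List.slice s (some (j - 2)) (some (j + 1)) = ['1', '7', '3']
              then c173 + 1 else c173
    if 5 < cy' then ans
    else goA s i js c' cy' (if cy' = 5 ∧ 2 ≤ c' ∧ ans < j - i + 1 then j - i + 1 else ans)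

def number_9 (line : String) : Int :=
  let s := (PySem.Str.strip line).toList
  (PySem.List.pyRange 0 (s.length : Int) 1).foldl
    (fun answer i => goA s i (PySem.List.pyRange i (s.length : Int) 1) 0 0 answer) 0

-- ===== PORT B =====
-- one step of B's single pass; st = (cnt, answer); all pyGet? indices are in range (proved below)
def stepB (s : List Char) (ys P : List Int) (st : Int × Int) (i : Int) : Int × Int :=
  let answer :=
    if st.1 + 4 < (ys.length : Int) then
      let jmax := if st.1 + 5 < (ys.length : Int)
        then (PySem.List.pyGet? ys (st.1 + 5)).getD 0 - 1
        else (s.length : Int) - 1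
      if 2 ≤ (PySem.List.pyGet? P (jmax + 1)).getD 0 - (PySem.List.pyGet? P (i + 2)).getD 0
          ∧ st.2 < jmax - i + 1
      then jmax - i + 1 else st.2
    else st.2
  let cnt := if PySem.List.pyGet? s i = some 'Y' then st.1 + 1 else st.1
  (cnt, answer)

-- ys = [k for k in range(n) if line[k] == "Y"]
def ysOf (s : List Char) : List Int :=
  (PySem.List.pyRange 0 (s.length : Int) 1).filter
    (fun k => decide (PySem.List.pyGet? s k = some 'Y'))

-- P[k] = number of "173" occurrences ending strictly before index k (built by appending)
def buildP (s : List Char) : List Int :=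
  (PySem.List.pyRange 0 (s.length : Int) 1).foldl
    (fun P k => P ++ [(PySem.List.pyGet? P (-1)).getD 0 +
      (if 2 ≤ k ∧ PySem.List.slice s (some (k - 2)) (some (k + 1)) = ['1', '7', '3']
       then 1 else 0)])
    [0]

def number_9_alt (line : String) : Int :=
  let s := (PySem.Str.strip line).toList
  let ys := ysOf s
  let P := buildP s
  ((PySem.List.pyRange 0 (s.length : Int) 1).foldl (stepB s ys P) (0, 0)).2

-- ===== PRECONDITION & SPEC =====
def Spec_number_9 (line : String) (out : Int) : Prop := out = number_9_alt line
instance (line : String) (out : Int) : Decidable (Spec_number_9 line out) := by unfold Spec_number_9; infer_instance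

-- ===== CLAIM (what is proved, stated in full; the proofs are below) =====
def Claim_equal_number_9 : Prop := ∀ (line : String), Dom_number_9 line → Spec_number_9 line (number_9 line)

-- ===== LEMMAS AND PROOFS =====

-- counting helpers used only by the proofs
def qY (s : List Char) (k : Int) : Bool := decide (PySem.List.pyGet? s k = some 'Y')
def qM (s : List Char) (k : Int) : Bool :=
  decide (PySem.List.slice s (some (k - 2)) (some (k + 1)) = ['1', '7', '3'])
-- number of Y's at indices in [i, j)
def Yc (s : List Char) (i j : Int) : Int := ((PySem.List.pyRange i j 1).countP (qY s) : Int)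
-- number of "173" occurrences ending at an index in [i+2, j)
def Cc (s : List Char) (i j : Int) : Int := ((PySem.List.pyRange (i + 2) j 1).countP (qM s) : Int)
-- number of "173" occurrences ending at an index in [0, j) (what B's table P stores)
def Mc (s : List Char) (j : Int) : Int :=
  ((PySem.List.pyRange 0 j 1).countP (fun k => decide (2 ≤ k) && qM s k) : Int)
-- one update of A's answer, for window [i, j]
def updA (s : List Char) (i a j : Int) : Int :=
  if Yc s i (j + 1) = 5 ∧ 2 ≤ Cc s i (j + 1) ∧ a < j - i + 1 then j - i + 1 else a

-- ---- basic counting facts ----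

theorem Cc_nonneg (s : List Char) (i j : Int) : 0 ≤ Cc s i j := Int.natCast_nonneg _

theorem Yc_self (s : List Char) (i : Int) : Yc s i i = 0 := by
  unfold Yc
  rw [PySem.List.pyRange_one_eq_nil le_rfl]
  rfl

theorem Cc_zero_of_le (s : List Char) {i j : Int} (h : j ≤ i + 2) : Cc s i j = 0 := by
  unfold Cc
  rw [PySem.List.pyRange_one_eq_nil h]
  rfl

theorem Yc_succ (s : List Char) {i j : Int} (h : i ≤ j) :
    Yc s i (j + 1) = Yc s i j + (if qY s j then 1 else 0) := by
  unfold Yc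
  rw [PySem.List.pyRange_one_succ_right h, List.countP_append]
  simp [List.countP_cons]

theorem Cc_succ (s : List Char) {i j : Int} (h : i + 2 ≤ j) :
    Cc s i (j + 1) = Cc s i j + (if qM s j then 1 else 0) := by
  unfold Cc
  rw [PySem.List.pyRange_one_succ_right h, List.countP_append]
  simp [List.countP_cons]

theorem Yc_mono (s : List Char) {i j j' : Int} (h1 : i ≤ j) (h2 : j ≤ j') :
    Yc s i j ≤ Yc s i j' := by
  unfold Yc
  rw [PySem.List.pyRange_one_append i j j' h1 h2, List.countP_append]
  push_cast
  omega

theorem Cc_mono (s : List Char) {i j j' : Int} (h2 : j ≤ j') :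
    Cc s i j ≤ Cc s i j' := by
  by_cases h : i + 2 ≤ j
  · unfold Cc
    rw [PySem.List.pyRange_one_append (i + 2) j j' h h2, List.countP_append]
    push_cast
    omega
  · rw [Cc_zero_of_le s (by omega)]
    exact Cc_nonneg s i j'

theorem Mc_zero (s : List Char) : Mc s 0 = 0 := by
  unfold Mc
  rw [PySem.List.pyRange_one_eq_nil le_rfl]
  rfl

theorem Mc_succ (s : List Char) {j : Int} (h : 0 ≤ j) :
    Mc s (j + 1) = Mc s j + (if 2 ≤ j ∧ qM s j = true then 1 else 0) := by
  unfold Mc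
  rw [PySem.List.pyRange_one_succ_right h, List.countP_append]
  simp [List.countP_cons]

theorem Cc_eq_Mc (s : List Char) {i j : Int} (hi : 0 ≤ i) (h : i + 2 ≤ j) :
    Cc s i j = Mc s j - Mc s (i + 2) := by
  unfold Mc
  rw [PySem.List.pyRange_one_append 0 (i + 2) j (by omega) h, List.countP_append]
  have : (PySem.List.pyRange (i + 2) j 1).countP (fun k => decide (2 ≤ k) && qM s k)
       = (PySem.List.pyRange (i + 2) j 1).countP (qM s) := by
    apply List.countP_congr
    intro x hx
    rw [PySem.List.mem_pyRange_one] at hx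
    simp [show (2 : Int) ≤ x by omega]
  rw [this]
  unfold Cc
  push_cast
  ring

-- ---- A's inner loop computes a fold of updA over the remaining range ----

theorem foldl_updA_noop (s : List Char) (i : Int) (L : List Int) (ans : Int)
    (h : ∀ j ∈ L, ¬(Yc s i (j + 1) = 5 ∧ 2 ≤ Cc s i (j + 1))) :
    L.foldl (updA s i) ans = ans := by
  rw [PySem.List.foldl_congr_mem L (updA s i) (fun acc _ => acc) ans]
  · exact PySem.List.foldl_ignore L ans
  · intro acc j hj
    unfold updA
    have := h j hj
    split_ifs with hc
    · exact absurd ⟨hc.1, hc.2.1⟩ this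
    · rfl

theorem goA_eq (s : List Char) (i : Int) :
    ∀ (fuel : Nat) (j ans : Int), i ≤ j → ((s.length : Int) - j).toNat = fuel →
    goA s i (PySem.List.pyRange j (s.length : Int) 1) (Cc s i j) (Yc s i j) ans =
      (PySem.List.pyRange j (s.length : Int) 1).foldl (updA s i) ans := by
  intro fuel
  induction fuel with
  | zero =>
    intro j ans hij hf
    rw [PySem.List.pyRange_one_eq_nil (by omega)]
    rfl
  | succ m ih =>
    intro j ans hij hf
    have hjn : j < (s.length : Int) := by omega
    rw [PySem.List.pyRange_one_cons hjn]
    have hcy : (if PySem.List.pyGet? s j = some 'Y' then Yc s i j + 1 else Yc s i j)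
        = Yc s i (j + 1) := by
      rw [Yc_succ s hij]
      by_cases hq : PySem.List.pyGet? s j = some 'Y' <;> simp [qY, hq]
    have hc' : (if i + 2 ≤ j ∧ PySem.List.slice s (some (j - 2)) (some (j + 1)) = ['1', '7', '3']
          then Cc s i j + 1 else Cc s i j) = Cc s i (j + 1) := by
      by_cases h2 : i + 2 ≤ j
      · rw [Cc_succ s h2]
        by_cases hq : PySem.List.slice s (some (j - 2)) (some (j + 1)) = ['1', '7', '3'] <;>
          simp [qM, hq, h2]
      · rw [Cc_zero_of_le s (by omega), Cc_zero_of_le s (by omega)]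
        simp [h2]
    show goA s i (j :: PySem.List.pyRange (j + 1) (s.length : Int) 1) (Cc s i j) (Yc s i j) ans = _
    rw [goA]
    simp only [hcy, hc']
    by_cases hbig : 5 < Yc s i (j + 1)
    · rw [if_pos hbig]
      rw [List.foldl_cons]
      have hj0 : updA s i ans j = ans := by
        unfold updA
        rw [if_neg]
        rintro ⟨h5, -⟩
        omega
      rw [hj0]
      rw [foldl_updA_noop]
      intro jj hjj
      rw [PySem.List.mem_pyRange_one] at hjj
      rintro ⟨h5, -⟩
      have : Yc s i (j + 1) ≤ Yc s i (jj + 1) := Yc_mono s (by omega) (by omega)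
      omega
    · rw [if_neg hbig]
      rw [List.foldl_cons]
      have hupd : (if Yc s i (j + 1) = 5 ∧ 2 ≤ Cc s i (j + 1) ∧ ans < j - i + 1
            then j - i + 1 else ans) = updA s i ans j := by rfl
      rw [hupd]
      exact ih (j + 1) (updA s i ans j) (by omega) (by omega)

-- ---- B's table P holds the prefix counts Mc ----

theorem P_table (s : List Char) : ∀ (m : Nat),
    (PySem.List.pyRange 0 (m : Int) 1).foldl
      (fun P k => P ++ [(PySem.List.pyGet? P (-1)).getD 0 +
        (if 2 ≤ k ∧ PySem.List.slice s (some (k - 2)) (some (k + 1)) = ['1', '7', '3']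
         then 1 else 0)]) [0]
    = (PySem.List.pyRange 0 ((m : Int) + 1) 1).map (Mc s) := by
  intro m
  induction m with
  | zero =>
    have h1 : PySem.List.pyRange 0 ((0 : Nat) : Int) 1 = [] :=
      PySem.List.pyRange_one_eq_nil (by omega)
    have h2 : PySem.List.pyRange 0 (((0 : Nat) : Int) + 1) 1 = [0] := by decide
    rw [h1, h2, List.foldl_nil, List.map_singleton, Mc_zero]
  | succ m ih =>
    have hcast : ((m + 1 : Nat) : Int) = (m : Int) + 1 := by push_cast; ring
    have hsp : PySem.List.pyRange 0 ((m : Int) + 1) 1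
        = PySem.List.pyRange 0 (m : Int) 1 ++ [(m : Int)] :=
      PySem.List.pyRange_one_succ_right (by omega)
    have hlast : (PySem.List.pyGet? ((PySem.List.pyRange 0 ((m : Int) + 1) 1).map (Mc s))
        (-1)).getD 0 = Mc s (m : Int) := by
      rw [hsp, List.map_append, List.map_singleton,
        PySem.List.pyGet?_neg_one_append_singleton, Option.getD_some]
    have hstep : Mc s (m : Int) +
        (if 2 ≤ (m : Int) ∧ PySem.List.slice s (some ((m : Int) - 2)) (some ((m : Int) + 1))
            = ['1', '7', '3'] then 1 else 0) = Mc s ((m : Int) + 1) := by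
      rw [Mc_succ s (by omega)]
      simp [qM]
    have hsp2 : PySem.List.pyRange 0 ((m : Int) + 1 + 1) 1
        = PySem.List.pyRange 0 ((m : Int) + 1) 1 ++ [(m : Int) + 1] :=
      PySem.List.pyRange_one_succ_right (by omega)
    rw [hcast, PySem.List.pyRange_one_succ_right (by omega), List.foldl_append, ih,
      List.foldl_cons, List.foldl_nil, hlast, hstep, hsp2, List.map_append, List.map_singleton]

theorem P_lookup (s : List Char) {k : Int} (h0 : 0 ≤ k) (h1 : k ≤ (s.length : Int)) :
    (PySem.List.pyGet? (buildP s) k).getD 0 = Mc s k := by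
  unfold buildP
  rw [P_table s s.length]
  show PySem.List.pyGetD _ k 0 = Mc s k
  exact PySem.List.pyGetD_map_pyRange_of_nonneg (Mc s) ((s.length : Int) + 1) k 0 h0 (by omega)

-- ---- the t-th retained index of a filtered range has exactly t earlier hits ----

theorem filter_pos (s : List Char) (i n : Int) (t : Nat)
    (ht : t < ((PySem.List.pyRange i n 1).filter (qY s)).length) :
    qY s (((PySem.List.pyRange i n 1).filter (qY s))[t]) = true ∧
    i ≤ ((PySem.List.pyRange i n 1).filter (qY s))[t] ∧
    ((PySem.List.pyRange i n 1).filter (qY s))[t] < n ∧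
    (PySem.List.pyRange i (((PySem.List.pyRange i n 1).filter (qY s))[t]) 1).countP (qY s) = t ∧
    i + (t : Int) ≤ ((PySem.List.pyRange i n 1).filter (qY s))[t] := by
  set F := (PySem.List.pyRange i n 1).filter (qY s) with hFdef
  set y := F[t] with hydef
  have hyF : y ∈ F := List.getElem_mem ht
  have hmem := List.mem_filter.mp hyF
  have hbnd := PySem.List.mem_pyRange_one.mp hmem.1
  have hcount : (PySem.List.pyRange i y 1).countP (qY s) = t := by
    have hsplit : PySem.List.pyRange i n 1 = PySem.List.pyRange i y 1 ++ PySem.List.pyRange y n 1 :=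
      PySem.List.pyRange_one_append i y n hbnd.1 hbnd.2.le
    have hcons : PySem.List.pyRange y n 1 = y :: PySem.List.pyRange (y + 1) n 1 :=
      PySem.List.pyRange_one_cons hbnd.2
    have hF : F = (PySem.List.pyRange i y 1).filter (qY s) ++
        (y :: (PySem.List.pyRange (y + 1) n 1).filter (qY s)) := by
      rw [hFdef, hsplit, List.filter_append, hcons, List.filter_cons_of_pos hmem.2]
    set A := (PySem.List.pyRange i y 1).filter (qY s) with hAdef
    have hlen : A.length < F.length := by
      rw [hF]
      simp
    have hgetA : F[A.length] = y := by
      rw [List.getElem_of_eq hF]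
      rw [List.getElem_append_right le_rfl]
      simp
    have hnd : F.Nodup := List.Nodup.filter _ (PySem.List.nodup_pyRange_one i n)
    have hteq : t = A.length := by
      have : F[t] = F[A.length] := by rw [hgetA, ← hydef]
      exact (List.Nodup.getElem_inj_iff hnd).mp this
    rw [List.countP_eq_length_filter, ← hAdef, ← hteq]
  refine ⟨hmem.2, hbnd.1, hbnd.2, hcount, ?_⟩
  have h1 : (PySem.List.pyRange i y 1).countP (qY s) ≤ (PySem.List.pyRange i y 1).length :=
    List.countP_le_length
  rw [hcount, PySem.List.length_pyRange_one] at h1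
  omega

theorem foldl_updA_last (s : List Char) (i jm : Int)
    (hv : Yc s i (jm + 1) = 5 ∧ 2 ≤ Cc s i (jm + 1)) :
    ∀ (L : List Int), (∀ j ∈ L, j < jm) → ∀ ans,
    (L ++ [jm]).foldl (updA s i) ans = if ans < jm - i + 1 then jm - i + 1 else ans := by
  intro L
  induction L with
  | nil =>
    intro _ ans
    simp [updA, hv.1, hv.2]
  | cons j L ih =>
    intro hjs ans
    rw [List.cons_append, List.foldl_cons, ih (fun x hx => hjs x (List.mem_cons_of_mem j hx))]
    have hjlt : j < jm := hjs j List.mem_cons_self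
    unfold updA
    by_cases hc : Yc s i (j + 1) = 5 ∧ 2 ≤ Cc s i (j + 1) ∧ ans < j - i + 1
    · rw [if_pos hc, if_pos (by omega : j - i + 1 < jm - i + 1), if_pos (by omega : ans < jm - i + 1)]
    · rw [if_neg hc]

-- core of the per-start argument: if [i, jm] is THE widest window with exactly five Y's,
-- B's O(1) check equals A's inner fold
theorem perI_core (s : List Char) {i : Int} (hi0 : 0 ≤ i) (hin : i < (s.length : Int))
    (ans jm : Int) (hlb : i + 4 ≤ jm) (hub : jm < (s.length : Int))
    (hY5 : Yc s i (jm + 1) = 5)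
    (hYbig : ∀ j, jm < j → j < (s.length : Int) → ¬(Yc s i (j + 1) = 5)) :
    (if 2 ≤ (PySem.List.pyGet? (buildP s) (jm + 1)).getD 0 -
          (PySem.List.pyGet? (buildP s) (i + 2)).getD 0 ∧ ans < jm - i + 1
     then jm - i + 1 else ans)
    = (PySem.List.pyRange i (s.length : Int) 1).foldl (updA s i) ans := by
  rw [P_lookup s (k := jm + 1) (by omega) (by omega),
    P_lookup s (k := i + 2) (by omega) (by omega),
    ← Cc_eq_Mc s hi0 (by omega : i + 2 ≤ jm + 1)]
  by_cases hC : 2 ≤ Cc s i (jm + 1)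
  · rw [PySem.List.pyRange_one_append i (jm + 1) (s.length : Int) (by omega) (by omega),
      List.foldl_append, PySem.List.pyRange_one_succ_right (by omega : i ≤ jm),
      foldl_updA_last s i jm ⟨hY5, hC⟩ _
        (fun j hj => (PySem.List.mem_pyRange_one.mp hj).2) ans,
      foldl_updA_noop s i _ _
        (fun j hj => by
          have hb := PySem.List.mem_pyRange_one.mp hj
          rintro ⟨h5, -⟩
          exact hYbig j (by omega) (by omega) h5)]
    simp [hC]
  · rw [if_neg (fun h => hC h.1), foldl_updA_noop]
    intro j hj
    have hb := PySem.List.mem_pyRange_one.mp hj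
    rintro ⟨h5, h2c⟩
    by_cases hjm : j ≤ jm
    · have hmono : Cc s i (j + 1) ≤ Cc s i (jm + 1) := Cc_mono s (by omega)
      omega
    · exact hYbig j (by omega) (by omega) h5

-- ---- each step of B computes exactly A's best window starting at i ----

theorem perI (s : List Char) {i : Int} (hi0 : 0 ≤ i) (hin : i < (s.length : Int)) (cnt ans : Int)
    (hcnt : cnt = Yc s 0 i) :
    (stepB s (ysOf s) (buildP s) (cnt, ans) i).2
    = (PySem.List.pyRange i (s.length : Int) 1).foldl (updA s i) ans := by
  have hysOf : ysOf s = (PySem.List.pyRange 0 (s.length : Int) 1).filter (qY s) := rfl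
  set n : Int := (s.length : Int) with hn
  set ys := (PySem.List.pyRange 0 n 1).filter (qY s) with hys
  set ysLow := (PySem.List.pyRange 0 i 1).filter (qY s) with hysLow
  set yh := (PySem.List.pyRange i n 1).filter (qY s) with hyh
  have hysplit : ys = ysLow ++ yh := by
    rw [hys, PySem.List.pyRange_one_append 0 i n hi0 hin.le, List.filter_append]
  have hcntLow : cnt = (ysLow.length : Int) := by
    rw [hcnt]
    unfold Yc
    rw [List.countP_eq_length_filter]
  have hyhlen : ((yh.length : Nat) : Int) = Yc s i n := by
    unfold Yc
    rw [List.countP_eq_length_filter]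
  have hyslen : ys.length = ysLow.length + yh.length := by rw [hysplit, List.length_append]
  simp only [stepB, hysOf]
  by_cases hge5 : 5 ≤ yh.length
  · rw [if_pos (show cnt + 4 < (ys.length : Int) by rw [hcntLow]; push_cast [hyslen]; omega)]
    by_cases h6 : 6 ≤ yh.length
    · -- the sixth Y exists: the window ends just before it
      have h5lt : 5 < yh.length := by omega
      rw [if_pos (show cnt + 5 < (ys.length : Int) by rw [hcntLow]; push_cast [hyslen]; omega)]
      have hget : PySem.List.pyGet? ys (cnt + 5) = some yh[5] := by
        have hc : cnt + 5 = ((ysLow.length + 5 : Nat) : Int) := by rw [hcntLow]; push_cast; ring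
        rw [hc, PySem.List.pyGet?_natCast, hysplit,
          List.getElem?_append_right (by omega), Nat.add_sub_cancel_left,
          List.getElem?_eq_getElem h5lt]
      rw [hget, Option.getD_some]
      obtain ⟨hq5, hi5, hn5, hc5, hlb⟩ := filter_pos s i n 5 h5lt
      simp only [← hyh] at hq5 hi5 hn5 hc5 hlb
      have hY5' : Yc s i yh[5] = 5 := by
        unfold Yc
        rw [hc5]
        norm_num
      have hY6 : Yc s i (yh[5] + 1) = 6 := by rw [Yc_succ s hi5, hY5', hq5]; norm_num
      exact perI_core s hi0 hin ans (yh[5] - 1) (by omega) (by omega)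
        (by
          rw [Int.sub_add_cancel, hY5'])
        (fun j hj1 hj2 => by
          have hm : Yc s i (yh[5] + 1) ≤ Yc s i (j + 1) := Yc_mono s (by omega) (by omega)
          omega)
    · -- exactly five Y's from i on: the window runs to the end of the string
      have hlen5 : yh.length = 5 := by omega
      rw [if_neg (show ¬(cnt + 5 < (ys.length : Int)) by
        rw [hcntLow]; push_cast [hyslen]; omega)]
      obtain ⟨hq4, hi4, hn4, hc4, hlb⟩ := filter_pos s i n 4 (hyh ▸ (by omega : 4 < yh.length))
      simp only [← hyh] at hq4 hi4 hn4 hc4 hlb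
      exact perI_core s hi0 hin ans (n - 1) (by omega) (by omega)
        (by
          have he : n - 1 + 1 = n := by omega
          rw [he, ← hyhlen, hlen5]
          norm_num)
        (fun j hj1 hj2 => by omega)
  · rw [if_neg (show ¬(cnt + 4 < (ys.length : Int)) by
      rw [hcntLow]; push_cast [hyslen]; omega)]
    rw [foldl_updA_noop]
    intro j hj
    rw [PySem.List.mem_pyRange_one] at hj
    rintro ⟨h5, -⟩
    have hm : Yc s i (j + 1) ≤ Yc s i n := Yc_mono s (by omega) (by omega)
    rw [← hyhlen] at hm
    omega

-- ---- the whole pass: B's fold over starts equals A's fold over starts ----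

theorem outer (s : List Char) : ∀ (fuel : Nat) (a cnt ans : Int), 0 ≤ a →
    ((s.length : Int) - a).toNat = fuel → cnt = Yc s 0 a →
    ((PySem.List.pyRange a (s.length : Int) 1).foldl (stepB s (ysOf s) (buildP s)) (cnt, ans)).2
    = (PySem.List.pyRange a (s.length : Int) 1).foldl
        (fun ans i => (PySem.List.pyRange i (s.length : Int) 1).foldl (updA s i) ans) ans := by
  intro fuel
  induction fuel with
  | zero =>
    intro a cnt ans ha hf hcnt
    rw [PySem.List.pyRange_one_eq_nil (by omega)]
    rfl
  | succ m ih =>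
    intro a cnt ans ha hf hcnt
    have han : a < (s.length : Int) := by omega
    rw [PySem.List.pyRange_one_cons han, List.foldl_cons, List.foldl_cons]
    have hpair : stepB s (ysOf s) (buildP s) (cnt, ans) a
        = (if PySem.List.pyGet? s a = some 'Y' then cnt + 1 else cnt,
           (PySem.List.pyRange a (s.length : Int) 1).foldl (updA s a) ans) :=
      Prod.ext_iff.mpr ⟨rfl, perI s ha han cnt ans hcnt⟩
    rw [hpair]
    exact ih (a + 1) _ _ (by omega) (by omega)
      (by
        rw [Yc_succ s (by omega : (0 : Int) ≤ a), ← hcnt]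
        by_cases hq : PySem.List.pyGet? s a = some 'Y' <;> simp [qY, hq])

theorem number_9_spec : Claim_equal_number_9 := by
  intro line _
  unfold Spec_number_9
  simp only [number_9, number_9_alt]
  set s := (PySem.Str.strip line).toList with hs
  have hcong : (PySem.List.pyRange 0 (s.length : Int) 1).foldl
      (fun answer i => goA s i (PySem.List.pyRange i (s.length : Int) 1) 0 0 answer) 0
      = (PySem.List.pyRange 0 (s.length : Int) 1).foldl
      (fun ans i => (PySem.List.pyRange i (s.length : Int) 1).foldl (updA s i) ans) 0 := by
    apply PySem.List.foldl_congr_mem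
    intro acc i hi
    have h2 := goA_eq s i (((s.length : Int) - i).toNat) i acc le_rfl rfl
    rw [Cc_zero_of_le s (by omega), Yc_self s i] at h2
    exact h2
  rw [hcong]
  exact (outer s ((s.length : Int) - 0).toNat 0 0 0 le_rfl rfl (Yc_self s 0).symm).symm
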